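-- pv_equiv track=rewrite | github.com/LagutaNV2/HomeWork_MPI_06 | collection.py | get_durations_dict
-- ===== SOURCE A (Python) =====
-- def get_durations_dict(courses_list):
--     '''Наводим порядок: упорядочиваем курсы по продолжительности'''
--     durations_dict = {}
--     for id, course in enumerate(courses_list):
--         key = course["duration"]  # Получите значение из ключа duration
--         if key not in durations_dict.keys():
--             durations_dict[key] = [id]
--         else:
--             x = durations_dict[key]
--             x.append(id)
--             durations_dict[key] = x
--     durations_dict = dict(sorted(durations_dict.items()))
--     return durations_dict
-- ===== SOURCE B (Python) =====
-- def get_durations_dict(courses_list):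
--     '''Наводим порядок: упорядочиваем курсы по продолжительности'''
--     durs = [course["duration"] for course in courses_list]
--     return {k: [i for i, d in enumerate(durs) if d == k] for k in sorted(set(durs))}
-- ===== Notes on version B (the rewrite author's own statement) =====
-- stated objective: simpler
-- what changed: Instead of A's one-pass dict accumulation followed by sorting the items, B extracts the duration list once, computes the sorted set of distinct durations, and builds each group directly with a per-key comprehension over the enumerated durations.
import Mathlib
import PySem

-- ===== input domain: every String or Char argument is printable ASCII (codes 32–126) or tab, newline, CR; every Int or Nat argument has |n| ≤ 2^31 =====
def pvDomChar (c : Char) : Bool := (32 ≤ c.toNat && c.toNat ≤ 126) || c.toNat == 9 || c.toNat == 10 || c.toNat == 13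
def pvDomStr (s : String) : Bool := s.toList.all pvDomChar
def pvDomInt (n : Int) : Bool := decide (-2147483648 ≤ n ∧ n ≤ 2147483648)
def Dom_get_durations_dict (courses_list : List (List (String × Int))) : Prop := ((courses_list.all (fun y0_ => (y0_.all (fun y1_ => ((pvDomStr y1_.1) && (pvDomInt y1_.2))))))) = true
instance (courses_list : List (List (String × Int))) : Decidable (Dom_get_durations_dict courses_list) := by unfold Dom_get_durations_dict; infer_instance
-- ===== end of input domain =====

-- B groups by building the sorted set of distinct durations first, then one comprehension per key;
-- A accumulates a dict in one pass and sorts its items. Return-value equivalence on courses that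
-- all carry a "duration" key (Pre_); A mutates no argument.

-- ===== PORT A =====
-- course["duration"]: first-match lookup; the `.getD 0` default is unreachable under Pre_
-- (Python raises KeyError there, which Pre_ excludes).
-- `sorted(d.items())` compares (key, value) tuples; dict keys are distinct, so sorting by the
-- key alone is exact (the value component is never compared).
def get_durations_dict (courses_list : List (List (String × Int))) : List (Int × List Int) :=
  let d := (PySem.List.enumerate courses_list 0).foldl
    (fun d p =>
      let key := (p.2.lookup "duration").getD 0
      if d.contains key = false then
        d.insert key [p.1]
      else
        d.insert key (d.getD key [] ++ [p.1]))
    PySem.Dict.empty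
  PySem.List.sorted d.items (fun q => q.1) false

-- ===== PORT B =====
-- durs = [course["duration"] for course in courses_list]; same KeyError remark as in port A.
def get_durations_dict_alt (courses_list : List (List (String × Int))) : List (Int × List Int) :=
  let durs := courses_list.map (fun course => (course.lookup "duration").getD 0)
  (PySem.List.sorted (PySem.Set.ofList durs) (fun k => k) false).map
    (fun k => (k, ((PySem.List.enumerate durs 0).filter (fun p => p.2 == k)).map (fun p => p.1)))

-- ===== PRECONDITION & SPEC =====
-- Pre_ excludes exactly the inputs where some course lacks a "duration" key: there the Python A
-- (and B) raises KeyError.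
def Pre_get_durations_dict (courses_list : List (List (String × Int))) : Prop :=
  (courses_list.all (fun course => course.any (fun p => p.1 == "duration"))) = true
instance (courses_list : List (List (String × Int))) : Decidable (Pre_get_durations_dict courses_list) := by
  unfold Pre_get_durations_dict; infer_instance

def pvWitness_get_durations_dict : (List (List (String × Int))) :=
  [[("duration", 3)], [("title", 7), ("duration", 1)], [("duration", 3)]]

def Spec_get_durations_dict (courses_list : List (List (String × Int))) (out : List (Int × List Int)) : Prop := out = get_durations_dict_alt courses_list
instance (courses_list : List (List (String × Int))) (out : List (Int × List Int)) : Decidable (Spec_get_durations_dict courses_list out) := by unfold Spec_get_durations_dict; infer_instance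

-- ===== CLAIM (what is proved, stated in full; the proofs are below) =====
def Claim_equal_get_durations_dict : Prop := ∀ (courses_list : List (List (String × Int))), Dom_get_durations_dict courses_list → Pre_get_durations_dict courses_list → Spec_get_durations_dict courses_list (get_durations_dict courses_list)

-- ===== LEMMAS AND PROOFS =====

-- the duration of one course, as both ports read it
def pvDur (course : List (String × Int)) : Int := (course.lookup "duration").getD 0

-- A's loop body is a `modify … (· ++ [id])`
lemma pv_body_eq :
    (fun (d : PySem.Dict Int (List Int)) (p : Int × List (String × Int)) =>
      let key := (p.2.lookup "duration").getD 0
      if d.contains key = false then d.insert key [p.1]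
      else d.insert key (d.getD key [] ++ [p.1]))
    = fun d p => d.modify (pvDur p.2) [] (fun x => x ++ [p.1]) := by
  funext d p
  simp only [PySem.Dict.modify, pvDur]
  by_cases h : d.contains ((List.lookup "duration" p.2).getD 0) = false
  · rw [if_pos h, PySem.Dict.getD_of_not_contains d [] h]
    rfl
  · rw [if_neg h]

-- the filtered-group identity relating the two enumerations
lemma pv_filter_eq {α : Type} (f : α → Int) (cl : List α) (s : Int) (k : Int) :
    ((((PySem.List.enumerate cl s).map (fun p => (f p.2, p.1))).filter (fun q => q.1 == k)).map (fun q => q.2))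
    = (((PySem.List.enumerate (cl.map f) s).filter (fun q => q.2 == k)).map (fun q => q.1)) := by
  induction cl generalizing s with
  | nil => simp [PySem.List.enumerate_nil]
  | cons c t ih =>
      simp only [List.map_cons, PySem.List.enumerate_cons, List.map, List.filter]
      by_cases h : f c == k
      · simp [h, ih]
      · simp [h, ih]

theorem get_durations_dict_spec : Claim_equal_get_durations_dict := by
  intro cl _ _
  unfold Spec_get_durations_dict get_durations_dict get_durations_dict_alt
  rw [pv_body_eq]
  have hfold :
      List.foldl (fun (d : PySem.Dict Int (List Int)) (p : Int × List (String × Int)) =>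
          d.modify (pvDur p.2) [] fun x => x ++ [p.1]) PySem.Dict.empty (PySem.List.enumerate cl 0)
      = List.foldl (fun d q => d.modify q.1 [] fun x => x ++ [q.2]) PySem.Dict.empty
          ((PySem.List.enumerate cl 0).map (fun p => (pvDur p.2, p.1))) :=
    (List.foldl_map (f := fun p : Int × List (String × Int) => (pvDur p.2, p.1))
      (g := fun (d : PySem.Dict Int (List Int)) q => d.modify q.1 [] fun x => x ++ [q.2])
      (l := PySem.List.enumerate cl 0) (init := PySem.Dict.empty)).symm
  rw [hfold]
  -- the dict accumulated by A's loop, in paired form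
  have hgetD : ∀ k : Int,
      (((PySem.List.enumerate cl 0).map (fun p => (pvDur p.2, p.1))).foldl
        (fun d q => d.modify q.1 [] (fun x => x ++ [q.2])) PySem.Dict.empty).getD k []
      = ((((PySem.List.enumerate cl 0).map (fun p => (pvDur p.2, p.1))).filter (fun q => q.1 == k)).map (fun q => q.2)) := by
    intro k
    rw [PySem.Dict.getD_foldl_modify_append, PySem.Dict.getD_empty]
    simp
  have hmapkey : (PySem.List.enumerate cl 0).map (fun p => pvDur p.2) = cl.map pvDur := by
    rw [show (fun p : Int × List (String × Int) => pvDur p.2) = pvDur ∘ (fun p => p.2) from rfl,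
        ← List.map_map, PySem.List.map_snd_enumerate]
  have hkeys :
      (((PySem.List.enumerate cl 0).map (fun p => (pvDur p.2, p.1))).foldl
        (fun d q => d.modify q.1 [] (fun x => x ++ [q.2])) PySem.Dict.empty).keys
      = PySem.Set.ofList (cl.map pvDur) := by
    rw [List.foldl_map,
        PySem.Dict.keys_foldl_modify_key (PySem.List.enumerate cl 0) (fun p => pvDur p.2) []
          (fun _ p => fun x => x ++ [p.1]) PySem.Dict.empty,
        PySem.Dict.keys_empty, PySem.Set.update_nil_left, hmapkey]
  have hnodup :
      (((PySem.List.enumerate cl 0).map (fun p => (pvDur p.2, p.1))).foldl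
        (fun d q => d.modify q.1 [] (fun x => x ++ [q.2])) PySem.Dict.empty).keys.Nodup := by
    rw [hkeys]; exact PySem.Set.nodup_ofList _
  have hitems :
      (((PySem.List.enumerate cl 0).map (fun p => (pvDur p.2, p.1))).foldl
        (fun d q => d.modify q.1 [] (fun x => x ++ [q.2])) PySem.Dict.empty).items
      = (PySem.Set.ofList (cl.map pvDur)).map (fun k =>
          (k, (((PySem.List.enumerate cl 0).map (fun p => (pvDur p.2, p.1))).filter (fun q => q.1 == k)).map (fun q => q.2))) := by
    rw [PySem.Dict.items_eq_map_keys _ hnodup [], hkeys]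
    exact List.map_congr_left (fun k _ => by rw [hgetD k])
  have hsorted :
      PySem.List.sorted (((PySem.List.enumerate cl 0).map (fun p => (pvDur p.2, p.1))).foldl
        (fun d q => d.modify q.1 [] (fun x => x ++ [q.2])) PySem.Dict.empty).items (fun q => q.1) false
      = (PySem.List.sorted (PySem.Set.ofList (cl.map pvDur)) (fun k => k) false).map (fun k =>
          (k, (((PySem.List.enumerate cl 0).map (fun p => (pvDur p.2, p.1))).filter (fun q => q.1 == k)).map (fun q => q.2))) := by
    apply PySem.List.sorted_eq_of_perm_of_pairwise_lt
    · rw [hitems]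
      exact (PySem.List.sorted_perm (PySem.Set.ofList (cl.map pvDur)) (fun k => k) false).map _
    · exact List.Pairwise.map _ (fun a b h => h)
        (PySem.List.sorted_ofList_pairwise_lt (xs := cl.map pvDur))
  rw [hsorted]
  exact List.map_congr_left (fun k _ => congrArg (fun l => (k, l)) (pv_filter_eq pvDur cl 0 k))
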